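-- pv_equiv track=rewrite | github.com/Dreaucis/advent_of_code_2022 | 8/8.py | mark_visible_from_left
-- ===== SOURCE A (Python) =====
-- from typing import List
--
-- def mark_visible_from_left(mat: List[List[int]], scenic_matrix: List[List[int]]) -> List[List[int]]:
--     for i, row in enumerate(mat):
--         latest_height_ind = {}
--         for j, val in enumerate(row):
--             # Find how index of the latest height that is the same or lower
--             latest_geq = max(latest_height_ind.get(k, 0) for k in range(val, 10))
--
--             scenic_matrix[i][j] *= (j - latest_geq)
--             # Update index of latest height
--             latest_height_ind[val] = j
--     return scenic_matrix
-- ===== SOURCE B (Python) =====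
-- from typing import List
--
-- def mark_visible_from_left(mat: List[List[int]], scenic_matrix: List[List[int]]) -> List[List[int]]:
--     # Monotonic stack: like A, mutates scenic_matrix in place and returns it.
--     for i, row in enumerate(mat):
--         stack = []  # (index, height), heights non-increasing bottom -> top
--         for j, val in enumerate(row):
--             while stack and stack[-1][1] < val:
--                 stack.pop()
--             block = stack[-1][0] if stack else 0
--             scenic_matrix[i][j] *= (j - block)
--             stack.append((j, val))
--     return scenic_matrix
-- ===== Notes on version B (the rewrite author's own statement) =====
-- stated objective: faster
-- what changed: Replaced the per-cell height->latest-index dict plus a max over the 10-bucket range(val,10) with a single monotonic stack of (index,height) pairs per row (pop entries strictly lower than the current height; the top is the nearest blocking tree), removing the 10-lookup max scan per cell for an amortized O(1) stack operation.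
import Mathlib
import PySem

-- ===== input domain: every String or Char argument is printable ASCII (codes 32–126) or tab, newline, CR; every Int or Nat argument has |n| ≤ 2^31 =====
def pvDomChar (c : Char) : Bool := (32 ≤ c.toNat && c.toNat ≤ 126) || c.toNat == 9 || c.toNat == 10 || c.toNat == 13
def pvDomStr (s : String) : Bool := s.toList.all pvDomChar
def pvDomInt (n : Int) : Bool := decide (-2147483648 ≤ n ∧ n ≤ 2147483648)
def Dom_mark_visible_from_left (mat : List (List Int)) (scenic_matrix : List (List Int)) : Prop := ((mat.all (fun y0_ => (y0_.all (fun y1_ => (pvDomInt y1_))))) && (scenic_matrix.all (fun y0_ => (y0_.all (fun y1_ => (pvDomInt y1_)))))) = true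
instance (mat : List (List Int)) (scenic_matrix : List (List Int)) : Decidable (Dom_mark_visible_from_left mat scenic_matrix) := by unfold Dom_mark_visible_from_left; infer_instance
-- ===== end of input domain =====

-- B replaces A's height→latest-index dict and its 10-bucket max scan by a per-row monotonic
-- stack of (index, height) pairs; both A and the Python B mutate scenic_matrix in place and
-- return it — the equivalence proved here is about the return value.

-- ===== PORT A =====
-- A's 'max(latest_height_ind.get(k, 0) for k in range(val, 10))'; '.getD 0' only totalizes
-- the empty-range case val ≥ 10, on which Python's max raises ValueError (excluded by Pre_).
def pvMaxGeq (d : PySem.Dict Int Int) (val : Int) : Int :=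
  (PySem.List.max? ((PySem.List.pyRange val 10 1).map (fun k => d.getD k 0)) (fun x => x)).getD 0

-- A's inner-loop body: state = (latest_height_ind, scenic row); 'scenic_matrix[i][j] *= …'
-- becomes List.modify (a no-op exactly where Python raises IndexError, excluded by Pre_).
def pvStepA (st : PySem.Dict Int Int × List Int) (jv : Int × Int) : PySem.Dict Int Int × List Int :=
  let geq := pvMaxGeq st.1 jv.2
  (st.1.insert jv.2 jv.1, st.2.modify jv.1.toNat (fun x => x * (jv.1 - geq)))

def pvRowA (row : List Int) (srow : List Int) : List Int :=
  ((PySem.List.enumerate row 0).foldl pvStepA (PySem.Dict.empty, srow)).2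

def pvOuterA (sm : List (List Int)) (ir : Int × List Int) : List (List Int) :=
  sm.modify ir.1.toNat (fun srow => pvRowA ir.2 srow)

def mark_visible_from_left (mat : List (List Int)) (scenic_matrix : List (List Int)) : List (List Int) :=
  (PySem.List.enumerate mat 0).foldl pvOuterA scenic_matrix

-- ===== PORT B =====
-- B's 'while stack and stack[-1][1] < val: stack.pop()' (stack top = list head)
def pvPop (val : Int) : List (Int × Int) → List (Int × Int)
  | [] => []
  | (j, h) :: rest => if h < val then pvPop val rest else (j, h) :: rest

-- B's 'stack[-1][0] if stack else 0'
def pvBlk (s : List (Int × Int)) : Int :=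
  match s with
  | [] => 0
  | p :: _ => p.1

-- B's inner-loop body: state = (stack, scenic row)
def pvStepB (st : List (Int × Int) × List Int) (jv : Int × Int) : List (Int × Int) × List Int :=
  let s := pvPop jv.2 st.1
  let block := pvBlk s
  ((jv.1, jv.2) :: s, st.2.modify jv.1.toNat (fun x => x * (jv.1 - block)))

def pvRowB (row : List Int) (srow : List Int) : List Int :=
  ((PySem.List.enumerate row 0).foldl pvStepB ([], srow)).2

def pvOuterB (sm : List (List Int)) (ir : Int × List Int) : List (List Int) :=
  sm.modify ir.1.toNat (fun srow => pvRowB ir.2 srow)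

def mark_visible_from_left_alt (mat : List (List Int)) (scenic_matrix : List (List Int)) : List (List Int) :=
  (PySem.List.enumerate mat 0).foldl pvOuterB scenic_matrix

-- ===== PRECONDITION & SPEC =====
-- Pre_ admits matrices whose scenic_matrix covers mat's shape (otherwise A raises IndexError)
-- with all heights < 10: for a height ≥ 10 A's max over the empty range(val, 10) raises
-- ValueError. These are exactly the inputs on which A returns.
def Pre_mark_visible_from_left (mat : List (List Int)) (scenic_matrix : List (List Int)) : Prop :=
  mat.length ≤ scenic_matrix.length ∧
  (∀ p ∈ mat.zip scenic_matrix, p.1.length ≤ p.2.length) ∧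
  (∀ row ∈ mat, ∀ v ∈ row, v < 10)

instance (mat : List (List Int)) (scenic_matrix : List (List Int)) : Decidable (Pre_mark_visible_from_left mat scenic_matrix) := by
  unfold Pre_mark_visible_from_left; infer_instance

def pvWitness_mark_visible_from_left : List (List Int) × List (List Int) :=
  ([[1, 2, 1], [0, 3, 3]], [[1, 1, 1], [2, 2, 2]])

def Spec_mark_visible_from_left (mat : List (List Int)) (scenic_matrix : List (List Int)) (out : List (List Int)) : Prop := out = mark_visible_from_left_alt mat scenic_matrix
instance (mat : List (List Int)) (scenic_matrix : List (List Int)) (out : List (List Int)) : Decidable (Spec_mark_visible_from_left mat scenic_matrix out) := by unfold Spec_mark_visible_from_left; infer_instance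

-- ===== CLAIM (what is proved, stated in full; the proofs are below) =====
def Claim_equal_mark_visible_from_left : Prop := ∀ (mat : List (List Int)) (scenic_matrix : List (List Int)), Dom_mark_visible_from_left mat scenic_matrix → Pre_mark_visible_from_left mat scenic_matrix → Spec_mark_visible_from_left mat scenic_matrix (mark_visible_from_left mat scenic_matrix)

-- ===== LEMMAS AND PROOFS =====

lemma pvPop_pvPop (v val : Int) (h : v ≤ val) (s : List (Int × Int)) :
    pvPop val (pvPop v s) = pvPop val s := by
  induction s with
  | nil => rfl
  | cons p rest ih =>
    obtain ⟨j, hgt⟩ := p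
    by_cases h1 : hgt < v
    · have h2 : hgt < val := lt_of_lt_of_le h1 h
      simp [pvPop, h1, h2, ih]
    · simp [pvPop, h1]

lemma pvMaxGeq_empty (val : Int) : pvMaxGeq PySem.Dict.empty val = 0 := by
  unfold pvMaxGeq
  have hmap : (PySem.List.pyRange val 10 1).map (fun k => PySem.Dict.empty.getD k (0 : Int))
      = (PySem.List.pyRange val 10 1).map (fun _ => (0 : Int)) := by
    apply List.map_congr_left
    intro k _
    rfl
  rw [hmap]
  cases hm : PySem.List.max? ((PySem.List.pyRange val 10 1).map (fun _ => (0 : Int))) (fun x => x) with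
  | none => rfl
  | some m =>
    have hmem := PySem.List.max?_mem hm
    simp only [List.mem_map] at hmem
    obtain ⟨k, _, hk⟩ := hmem
    simp [← hk]

lemma pvMaxGeq_insert_gt (d : PySem.Dict Int Int) (v n val : Int) (h : v < val) :
    pvMaxGeq (d.insert v n) val = pvMaxGeq d val := by
  unfold pvMaxGeq
  have hmap : (PySem.List.pyRange val 10 1).map (fun k => (d.insert v n).getD k (0 : Int))
      = (PySem.List.pyRange val 10 1).map (fun k => d.getD k (0 : Int)) := by
    apply List.map_congr_left
    intro k hk
    rw [PySem.List.mem_pyRange_one] at hk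
    rw [PySem.Dict.getD_insert]
    rw [if_neg (by omega)]
  rw [hmap]

lemma pvMaxGeq_le (d : PySem.Dict Int Int) (val k : Int)
    (hk : k ∈ PySem.List.pyRange val 10 1) : d.getD k 0 ≤ pvMaxGeq d val := by
  unfold pvMaxGeq
  have hmem : d.getD k 0 ∈ (PySem.List.pyRange val 10 1).map (fun k => d.getD k (0 : Int)) :=
    List.mem_map.mpr ⟨k, hk, rfl⟩
  cases hm : PySem.List.max? ((PySem.List.pyRange val 10 1).map (fun k => d.getD k (0 : Int))) (fun x => x) with
  | none =>
    rw [PySem.List.max?_eq_none_iff] at hm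
    rw [hm] at hmem
    simp at hmem
  | some m =>
    have := PySem.List.max?_isMax hm _ hmem
    simpa using this

lemma pvMaxGeq_insert_le (d : PySem.Dict Int Int) (v n val : Int)
    (hle : val ≤ v) (hv : v < 10)
    (hb : pvMaxGeq d val ≤ n) :
    pvMaxGeq (d.insert v n) val = n := by
  have hvmem : v ∈ PySem.List.pyRange val 10 1 := PySem.List.mem_pyRange_one.mpr ⟨hle, hv⟩
  have hself : (d.insert v n).getD v 0 = n := by
    rw [PySem.Dict.getD_insert, if_pos rfl]
  have hnmem : n ∈ (PySem.List.pyRange val 10 1).map (fun k => (d.insert v n).getD k (0 : Int)) :=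
    List.mem_map.mpr ⟨v, hvmem, hself⟩
  unfold pvMaxGeq
  cases hm : PySem.List.max? ((PySem.List.pyRange val 10 1).map (fun k => (d.insert v n).getD k (0 : Int))) (fun x => x) with
  | none =>
    rw [PySem.List.max?_eq_none_iff] at hm
    rw [hm] at hnmem
    simp at hnmem
  | some m =>
    have hmge : n ≤ m := by simpa using PySem.List.max?_isMax hm _ hnmem
    have hmmem := PySem.List.max?_mem hm
    simp only [List.mem_map] at hmmem
    obtain ⟨k, hk, hkeq⟩ := hmmem
    have hmle : m ≤ n := by
      rw [← hkeq, PySem.Dict.getD_insert]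
      by_cases hkv : k = v
      · rw [if_pos hkv]
      · rw [if_neg hkv]
        exact le_trans (pvMaxGeq_le d val k hk) hb
    have : m = n := le_antisymm hmle hmge
    simp [this]

lemma pvRow_fold_eq : ∀ (row : List Int) (n : Int) (d : PySem.Dict Int Int)
    (s : List (Int × Int)) (srow : List Int),
    0 ≤ n →
    (∀ v ∈ row, v < 10) →
    (∀ w, w < 10 → pvMaxGeq d w = pvBlk (pvPop w s) ∧ 0 ≤ pvMaxGeq d w ∧ pvMaxGeq d w ≤ n) →
    ((PySem.List.enumerate row n).foldl pvStepA (d, srow)).2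
      = ((PySem.List.enumerate row n).foldl pvStepB (s, srow)).2 := by
  intro row
  induction row with
  | nil => intro n d s srow _ _ _; rfl
  | cons v rest ih =>
    intro n d s srow hn hvals hinv
    have hv : v < 10 := hvals v (List.mem_cons_self)
    rw [PySem.List.enumerate_cons]
    simp only [List.foldl_cons]
    have hblk : pvMaxGeq d v = pvBlk (pvPop v s) := (hinv v hv).1
    have hstepA : pvStepA (d, srow) (n, v)
        = (d.insert v n, srow.modify n.toNat (fun x => x * (n - pvMaxGeq d v))) := rfl
    have hstepB : pvStepB (s, srow) (n, v)
        = ((n, v) :: pvPop v s, srow.modify n.toNat (fun x => x * (n - pvBlk (pvPop v s)))) := rfl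
    rw [hstepA, hstepB, ← hblk]
    apply ih (n + 1)
    · omega
    · intro x hx; exact hvals x (List.mem_cons_of_mem _ hx)
    · intro w hw
      by_cases hwv : w ≤ v
      · have h1 : pvMaxGeq (d.insert v n) w = n :=
          pvMaxGeq_insert_le d v n w hwv hv (hinv w hw).2.2
        have h2 : pvPop w ((n, v) :: pvPop v s) = (n, v) :: pvPop v s := by
          simp [pvPop, show ¬ v < w by omega]
        rw [h1, h2]
        refine ⟨rfl, by omega, by omega⟩
      · have hlt : v < w := by omega
        have h1 : pvMaxGeq (d.insert v n) w = pvMaxGeq d w := pvMaxGeq_insert_gt d v n w hlt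
        have h2 : pvPop w ((n, v) :: pvPop v s) = pvPop w s := by
          rw [show pvPop w ((n, v) :: pvPop v s) = pvPop w (pvPop v s) by simp [pvPop, hlt]]
          exact pvPop_pvPop v w (le_of_lt hlt) s
        rw [h1, h2]
        exact ⟨(hinv w hw).1, (hinv w hw).2.1, by have := (hinv w hw).2.2; omega⟩
      
lemma pvRow_eq (row srow : List Int) (h : ∀ v ∈ row, v < 10) :
    pvRowA row srow = pvRowB row srow := by
  unfold pvRowA pvRowB
  apply pvRow_fold_eq row 0 PySem.Dict.empty [] srow le_rfl h
  intro w hw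
  rw [pvMaxGeq_empty]
  exact ⟨rfl, le_rfl, le_rfl⟩

lemma pvOuter_eq : ∀ (mat : List (List Int)) (n : Int) (sc : List (List Int)),
    (∀ row ∈ mat, ∀ v ∈ row, v < 10) →
    (PySem.List.enumerate mat n).foldl pvOuterA sc
      = (PySem.List.enumerate mat n).foldl pvOuterB sc := by
  intro mat
  induction mat with
  | nil => intro n sc _; rfl
  | cons row rest ih =>
    intro n sc h
    rw [PySem.List.enumerate_cons]
    simp only [List.foldl_cons]
    have hstep : pvOuterA sc (n, row) = pvOuterB sc (n, row) := by
      unfold pvOuterA pvOuterB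
      congr 1
      funext srow
      exact pvRow_eq row srow (h row (List.mem_cons_self))
    rw [hstep]
    exact ih (n + 1) _ (fun r hr => h r (List.mem_cons_of_mem _ hr))

-- ===== VERDICT (by name: the statement is the Claim_ definition above) =====
theorem mark_visible_from_left_spec : Claim_equal_mark_visible_from_left := by
  intro mat scenic_matrix _hdom hpre
  unfold Spec_mark_visible_from_left mark_visible_from_left mark_visible_from_left_alt
  exact pvOuter_eq mat 0 scenic_matrix hpre.2.2
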